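-- pv_equiv track=rewrite | github.com/jhnhnck/attu-wiki | scripts/attu_error_rate.py | break_at_newline
-- ===== SOURCE A (Python) =====
-- def break_at_newline(lines: list[str], maximum: int = 2000, end: str = '...\n') -> str:
--     result = ''
--
--     for line in lines:
--         holding = f'f{result}{line}\n'
--
--         if len(holding) + len(end) > maximum:
--             return result + end
--
--         result += line + '\n'
--
--     return '\n'.join(lines) + end
-- ===== SOURCE B (Python) =====
-- def break_at_newline(lines: list[str], maximum: int = 2000, end: str = '...\n') -> str:
--     used = 0
--     for i, line in enumerate(lines):
--         if used + len(line) + 1 + len(end) > maximum: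
--             return ''.join(l + '\n' for l in lines[:i]) + end
--         used += len(line) + 1
--     return '\n'.join(lines) + end
-- ===== Notes on version B (the rewrite author's own statement) =====
-- stated objective: alternative
-- what changed: B replaces A's accumulated result string (rebuilt and re-measured via the f-string 'holding' each iteration) by a single running integer length, joining the accepted prefix once at the end.
-- intended difference: On inputs where maximum exactly equals len(end) plus the newline-inclusive length of some nonempty prefix of lines (except when that prefix is all of lines and its last line is empty, where both agree), A's budget check - which measures a stray 'f' typed into the f-string f'f{result}{line}\n' - fires one character early, so A drops the last line of that prefix while B keeps every line that really fits; B's count is the intended budget. — e.g. on break_at_newline(["ab"], 4, "."): A returns ".", B returns "ab."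
import Mathlib
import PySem

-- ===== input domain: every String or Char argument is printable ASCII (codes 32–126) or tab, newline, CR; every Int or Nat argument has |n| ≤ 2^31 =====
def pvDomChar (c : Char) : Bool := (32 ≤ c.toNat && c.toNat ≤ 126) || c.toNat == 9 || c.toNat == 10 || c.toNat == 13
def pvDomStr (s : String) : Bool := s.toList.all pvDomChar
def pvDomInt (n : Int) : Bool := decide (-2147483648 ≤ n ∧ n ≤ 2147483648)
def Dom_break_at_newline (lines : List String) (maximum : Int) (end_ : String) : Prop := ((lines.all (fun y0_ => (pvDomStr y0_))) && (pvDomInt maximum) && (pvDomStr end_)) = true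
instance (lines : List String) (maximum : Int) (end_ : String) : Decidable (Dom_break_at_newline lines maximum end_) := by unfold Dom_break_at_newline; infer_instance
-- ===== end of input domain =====

-- B keeps a running integer length and joins the accepted prefix once at the end,
-- instead of A's rebuilding and re-measuring the accumulated string each iteration.

-- ===== PORT A =====
-- Strings are handled as character lists. The loop with its early `return`
-- becomes an Option-returning recursion: `some r` = the loop returned `r`,
-- `none` = the loop fell through.
def breakA_loop (maximum : Int) (endc : List Char) :
    List (List Char) → List Char → Option (List Char)
  | [], _ => none
  | l :: rest, result =>
      -- holding = f'f{result}{line}\n'  (the literal 'f' of A's f-string is kept)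
      let holding : List Char := 'f' :: (result ++ l ++ ['\n'])
      if (holding.length : Int) + (endc.length : Int) > maximum then
        some (result ++ endc)
      else
        breakA_loop maximum endc rest (result ++ l ++ ['\n'])

def break_at_newline (lines : List String) (maximum : Int) (end_ : String) : String :=
  match breakA_loop maximum end_.toList (lines.map String.toList) [] with
  | some r => String.ofList r
  | none => String.ofList (PySem.Chars.join ['\n'] (lines.map String.toList) ++ end_.toList)

-- ===== PORT B =====
-- B's loop keeps only two counters: `used` (length of the accepted prefix with
-- its newlines) and `i` (how many lines were accepted); `some i` on the early
-- return, `none` on fall-through.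
def breakB_loop (maximum : Int) (endlen : Int) :
    List (List Char) → Int → Nat → Option Nat
  | [], _, _ => none
  | l :: rest, used, i =>
      if used + (l.length : Int) + 1 + endlen > maximum then
        some i
      else
        breakB_loop maximum endlen rest (used + (l.length : Int) + 1) (i + 1)

def break_at_newline_alt (lines : List String) (maximum : Int) (end_ : String) : String :=
  match breakB_loop maximum (end_.toList.length : Int) (lines.map String.toList) 0 0 with
  | some i => String.ofList (((lines.map String.toList).take i).flatMap (fun l => l ++ ['\n']) ++ end_.toList)
  | none => String.ofList (PySem.Chars.join ['\n'] (lines.map String.toList) ++ end_.toList)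

-- ===== PRECONDITION & SPEC =====
-- On inputs where maximum exactly equals len(end) plus the newline-inclusive length
-- of some nonempty prefix of lines (except when that prefix is all of lines and its
-- last line is empty, where both agree), A's budget check — which measures a stray
-- 'f' typed into the f-string f'f{result}{line}\n' — fires one character early, so
-- A drops the last line of that prefix while B keeps every line that really fits;
-- B's count is the intended budget.
def D_break_at_newline (lines : List String) (maximum : Int) (end_ : String) : Prop :=
  ∃ i < lines.length,
    ((lines.take (i + 1)).map (fun s => (s.toList.length : Int) + 1)).sum
      + (end_.toList.length : Int) = maximum ∧ (i + 1 = lines.length → lines[i]! ≠ "")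
instance (lines : List String) (maximum : Int) (end_ : String) : Decidable (D_break_at_newline lines maximum end_) := by unfold D_break_at_newline; infer_instance

def Spec_break_at_newline (lines : List String) (maximum : Int) (end_ : String) (out : String) : Prop := ¬ D_break_at_newline lines maximum end_ → out = break_at_newline_alt lines maximum end_
instance (lines : List String) (maximum : Int) (end_ : String) (out : String) : Decidable (Spec_break_at_newline lines maximum end_ out) := by unfold Spec_break_at_newline; infer_instance

def pvDiffWitness_break_at_newline : List String × Int × String := (["ab"], 4, ".")
def pvDiffWitnessOut_break_at_newline : String × String := (".", "ab.")

-- ===== CLAIM (what is proved, stated in full; the proofs are below) =====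
def Claim_unchanged_break_at_newline : Prop := ∀ (lines : List String) (maximum : Int) (end_ : String), Dom_break_at_newline lines maximum end_ → Spec_break_at_newline lines maximum end_ (break_at_newline lines maximum end_)
def Claim_changed_break_at_newline : Prop := Dom_break_at_newline (pvDiffWitness_break_at_newline.1) (pvDiffWitness_break_at_newline.2.1) (pvDiffWitness_break_at_newline.2.2) ∧ D_break_at_newline (pvDiffWitness_break_at_newline.1) (pvDiffWitness_break_at_newline.2.1) (pvDiffWitness_break_at_newline.2.2) ∧ break_at_newline (pvDiffWitness_break_at_newline.1) (pvDiffWitness_break_at_newline.2.1) (pvDiffWitness_break_at_newline.2.2) = pvDiffWitnessOut_break_at_newline.1 ∧ break_at_newline_alt (pvDiffWitness_break_at_newline.1) (pvDiffWitness_break_at_newline.2.1) (pvDiffWitness_break_at_newline.2.2) = pvDiffWitnessOut_break_at_newline.2 ∧ pvDiffWitnessOut_break_at_newline.1 ≠ pvDiffWitnessOut_break_at_newline.2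
def Claim_exact_break_at_newline : Prop := ∀ (lines : List String) (maximum : Int) (end_ : String), Dom_break_at_newline lines maximum end_ → D_break_at_newline lines maximum end_ → break_at_newline lines maximum end_ ≠ break_at_newline_alt lines maximum end_

-- ===== LEMMAS AND PROOFS =====

-- `flatC p` is the value A's `result` holds after accepting exactly the lines of `p`.
def flatC (p : List (List Char)) : List Char := p.flatMap (fun l => l ++ ['\n'])

-- preLen xs i = total length (with a newline after each line) of the first i lines.
def preLen (xs : List (List Char)) (i : Nat) : Int :=
  ((xs.take i).map (fun l => (l.length : Int) + 1)).sum

theorem flatC_append_singleton (p : List (List Char)) (l : List Char) :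
    flatC (p ++ [l]) = flatC p ++ (l ++ ['\n']) := by
  simp [flatC]

theorem flatC_len_append (p : List (List Char)) (l : List Char) :
    ((flatC (p ++ [l])).length : Int) = ((flatC p).length : Int) + (l.length : Int) + 1 := by
  rw [flatC_append_singleton]; push_cast [List.length_append]; simp; ring

theorem preLen_cons_succ (l : List Char) (rs : List (List Char)) (j : Nat) :
    preLen (l :: rs) (j + 1) = ((l.length : Int) + 1) + preLen rs j := by
  simp [preLen, List.take_succ_cons]

theorem preLen_zero (xs : List (List Char)) : preLen xs 0 = 0 := by
  simp [preLen]

theorem preLen_ge : ∀ (xs : List (List Char)) (k : Nat), k ≤ xs.length → (k : Int) ≤ preLen xs k := by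
  intro xs
  induction xs with
  | nil => intro k hk; simp at hk; simp [hk, preLen_zero]
  | cons l rs ih =>
      intro k hk
      match k with
      | 0 => simp [preLen_zero]
      | k + 1 =>
          rw [preLen_cons_succ]
          have h1 := ih k (by simpa using Nat.lt_succ_iff.mp hk)
          have h2 : (0 : Int) ≤ (l.length : Int) := by positivity
          push_cast
          omega

theorem take_snoc {α : Type} (l : List α) (i : Nat) (h : i < l.length) :
    l.take (i + 1) = l.take i ++ [l[i]] := by
  rw [List.take_add_one, List.getElem?_eq_getElem h, Option.toList_some]

theorem join_snoc : ∀ (ys : List (List Char)) (l : List Char),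
    PySem.Chars.join ['\n'] (ys ++ [l]) = flatC ys ++ l := by
  intro ys
  induction ys with
  | nil => intro l; simp [PySem.Chars.join_singleton, flatC]
  | cons y ys ih =>
      intro l
      obtain ⟨z, zs, hz⟩ := List.exists_cons_of_ne_nil (l := ys ++ [l]) (by simp)
      rw [List.cons_append, hz, PySem.Chars.join_cons_cons, ← hz, ih]
      simp [flatC]

-- No index of `rest` hits the boundary ⇒ the two loops compute the same option.
theorem loop_eq (maximum : Int) (endc : List Char) :
    ∀ (rest p : List (List Char)),
      (∀ i, i < rest.length →
        (∀ j, j < i → ((flatC p).length : Int) + preLen rest j + ((rest[j]!.length : Int)) + 2 + (endc.length : Int) ≤ maximum) →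
        ((flatC p).length : Int) + preLen rest i + ((rest[i]!.length : Int)) + 1 + (endc.length : Int) ≠ maximum) →
      breakA_loop maximum endc rest (flatC p) =
        (breakB_loop maximum (endc.length : Int) rest ((flatC p).length : Int) p.length).map
          (fun t => flatC ((p ++ rest).take t) ++ endc) := by
  intro rest
  induction rest with
  | nil => intro p _; simp [breakA_loop, breakB_loop]
  | cons l rs ih =>
      intro p H
      have h0 : ((flatC p).length : Int) + (l.length : Int) + 1 + (endc.length : Int) ≠ maximum := by
        have := H 0 (by simp) (by intro j hj; omega)
        simpa [preLen_zero] using this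
      have hcond : ((('f' :: (flatC p ++ l ++ ['\n'])).length : Int) + (endc.length : Int) > maximum)
          ↔ (((flatC p).length : Int) + (l.length : Int) + 1 + (endc.length : Int) > maximum) := by
        simp; omega
      by_cases hb : ((flatC p).length : Int) + (l.length : Int) + 1 + (endc.length : Int) > maximum
      · rw [breakA_loop, breakB_loop]
        simp only [if_pos (hcond.mpr hb), if_pos hb, Option.map_some]
        have : (p ++ l :: rs).take p.length = p := by
          rw [show p ++ l :: rs = p ++ (l :: rs) from rfl, List.take_left]
        rw [this]
      · rw [breakA_loop, breakB_loop]
        simp only [if_neg (fun hh => hb (hcond.mp hh)), if_neg hb]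
        have hres : flatC p ++ l ++ ['\n'] = flatC (p ++ [l]) := by
          rw [flatC_append_singleton]; simp
        have H' : ∀ i, i < rs.length →
            (∀ j, j < i → ((flatC (p ++ [l])).length : Int) + preLen rs j + ((rs[j]!.length : Int)) + 2 + (endc.length : Int) ≤ maximum) →
            ((flatC (p ++ [l])).length : Int) + preLen rs i + ((rs[i]!.length : Int)) + 1 + (endc.length : Int) ≠ maximum := by
          intro i hi hprev
          have hprem : ∀ j, j < i + 1 → ((flatC p).length : Int) + preLen (l :: rs) j + (((l :: rs)[j]!.length : Int)) + 2 + (endc.length : Int) ≤ maximum := by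
            intro j hj
            match j with
            | 0 => simp [preLen_zero]; omega
            | j' + 1 =>
                have hp := hprev j' (by omega)
                rw [flatC_len_append] at hp
                rw [preLen_cons_succ]
                simp only [List.getElem!_cons_succ]
                omega
          have hmain := H (i + 1) (by simpa using Nat.succ_lt_succ hi) hprem
          rw [preLen_cons_succ] at hmain
          simp only [List.getElem!_cons_succ] at hmain
          rw [flatC_len_append]
          omega
        rw [hres, ih (p ++ [l]) H']
        have hlen : (((flatC (p ++ [l])).length : Int)) = ((flatC p).length : Int) + (l.length : Int) + 1 := flatC_len_append p l
        rw [hlen]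
        simp [List.append_assoc]

-- A's loop at a boundary index: A stops just BEFORE line i (the stray 'f' makes
-- its check strict one character early).
theorem loopA_boundary (maximum : Int) (endc : List Char) :
    ∀ (rest p : List (List Char)) (i : Nat), i < rest.length →
      ((flatC p).length : Int) + preLen rest (i + 1) + (endc.length : Int) = maximum →
      breakA_loop maximum endc rest (flatC p) = some (flatC (p ++ rest.take i) ++ endc) := by
  intro rest
  induction rest with
  | nil => intro p i hi; simp at hi
  | cons l rs ih =>
      intro p i hi hEq
      match i with
      | 0 =>
          rw [preLen_cons_succ, preLen_zero] at hEq
          rw [breakA_loop]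
          have : (('f' :: (flatC p ++ l ++ ['\n'])).length : Int) + (endc.length : Int) > maximum := by
            simp; omega
          simp only [if_pos this]
          simp [flatC]
      | i + 1 =>
          rw [preLen_cons_succ] at hEq
          have hge : ((i : Int) + 1) ≤ preLen rs (i + 1) := by
            have := preLen_ge rs (i + 1) (by simpa using Nat.lt_succ_iff.mp hi)
            push_cast at this ⊢; omega
          rw [breakA_loop]
          have hno : ¬ ((('f' :: (flatC p ++ l ++ ['\n'])).length : Int) + (endc.length : Int) > maximum) := by
            simp; omega
          simp only [if_neg hno]
          have hres : flatC p ++ l ++ ['\n'] = flatC (p ++ [l]) := by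
            rw [flatC_append_singleton]; simp
          rw [hres, ih (p ++ [l]) i (by simpa using Nat.lt_of_succ_lt_succ hi)
            (by rw [flatC_len_append]; omega)]
          simp [List.take_succ_cons, List.append_assoc]

-- once B's budget is exhausted it stops at the very next line (if any).
theorem loopB_stuck (maximum E used : Int) (c : Nat) (h : maximum ≤ used + E) :
    ∀ rest, breakB_loop maximum E rest used c = if rest.isEmpty then none else some c := by
  intro rest
  cases rest with
  | nil => simp [breakB_loop]
  | cons l rs =>
      rw [breakB_loop]
      have hl : (0 : Int) ≤ (l.length : Int) := by positivity
      simp only [if_pos (by omega : used + (l.length : Int) + 1 + E > maximum)]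
      simp

-- B's loop at a boundary index: B still accepts line i and stops right after it.
theorem loopB_boundary (maximum E : Int) :
    ∀ (rest : List (List Char)) (used : Int) (c i : Nat), i < rest.length →
      used + preLen rest (i + 1) + E = maximum →
      breakB_loop maximum E rest used c =
        if i + 1 = rest.length then none else some (c + i + 1) := by
  intro rest
  induction rest with
  | nil => intro used c i hi; simp at hi
  | cons l rs ih =>
      intro used c i hi hEq
      match i with
      | 0 =>
          rw [preLen_cons_succ, preLen_zero] at hEq
          rw [breakB_loop]
          simp only [if_neg (by omega : ¬ (used + (l.length : Int) + 1 + E > maximum))]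
          rw [loopB_stuck maximum E (used + (l.length : Int) + 1) (c + 1) (by omega) rs]
          cases rs <;> simp
      | i + 1 =>
          rw [preLen_cons_succ] at hEq
          have hge : ((i : Int) + 1) ≤ preLen rs (i + 1) := by
            have := preLen_ge rs (i + 1) (by simpa using Nat.lt_succ_iff.mp hi)
            push_cast at this ⊢; omega
          rw [breakB_loop]
          simp only [if_neg (by omega : ¬ (used + (l.length : Int) + 1 + E > maximum))]
          rw [ih (used + (l.length : Int) + 1) (c + 1) i (by simpa using Nat.lt_of_succ_lt_succ hi) (by omega)]
          by_cases hc : i + 1 = rs.length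
          · simp [hc]
          · have : ¬ (i + 1 + 1 = rs.length + 1) := by omega
            simp only [List.length_cons]
            rw [if_neg hc, if_neg this]
            congr 1
            omega

-- bridges between D's arithmetic over `lines` and the loops' over `lines.map toList`
theorem get_map_toList (lines : List String) (k : Nat) (hk : k < lines.length) :
    (lines.map String.toList)[k]! = lines[k]!.toList := by
  simp [List.getElem!_eq_getElem?_getD, List.getElem?_map, (List.getElem?_eq_getElem (by simpa using hk))]

theorem preLen_map_toList (lines : List String) (j : Nat) :
    preLen (lines.map String.toList) j = ((lines.take j).map (fun s => (s.toList.length : Int) + 1)).sum := by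
  simp [preLen, ← List.map_take, List.map_map, Function.comp_def]

-- ===== VERDICT (by name: the statements are the Claim_ definitions above) =====
theorem break_at_newline_spec : Claim_unchanged_break_at_newline := by
  intro lines maximum end_ _ hnd
  unfold break_at_newline break_at_newline_alt
  by_cases hdiv : ∃ i, i < lines.length ∧
      ((lines.take (i + 1)).map (fun s => (s.toList.length : Int) + 1)).sum
        + (end_.toList.length : Int) = maximum
  · obtain ⟨i, hi, hEqS⟩ := hdiv
    have hcorner : i + 1 = lines.length ∧ lines[i]! = "" := by
      by_contra hc
      exact hnd ⟨i, hi, hEqS, fun hlen => by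
        by_contra hempty
        exact hc ⟨hlen, by simpa using hempty⟩⟩
    have hix : i < (lines.map String.toList).length := by simpa using hi
    have hEqP : preLen (lines.map String.toList) (i + 1) + (end_.toList.length : Int) = maximum := by
      rw [preLen_map_toList]; exact hEqS
    have hA := loopA_boundary maximum end_.toList (lines.map String.toList) [] i hix
      (by simp only [flatC, List.flatMap_nil, List.length_nil, Nat.cast_zero, zero_add]; exact hEqP)
    rw [show flatC ([] : List (List Char)) = [] from rfl, List.nil_append] at hA
    have hB := loopB_boundary maximum (end_.toList.length : Int) (lines.map String.toList) 0 0 i hix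
      (by omega)
    rw [if_pos (by simpa using hcorner.1)] at hB
    rw [hA, hB]
    have h2 : (lines.map String.toList)[i] = [] := by
      have : lines[i] = "" := by
        have := hcorner.2
        rwa [List.getElem!_eq_getElem?_getD, List.getElem?_eq_getElem hi, Option.getD_some] at this
      simp [this]
    have hsplit : lines.map String.toList = (lines.map String.toList).take i ++ [[]] := by
      have h1 : (lines.map String.toList).take (i + 1) = lines.map String.toList := by
        apply List.take_of_length_le; simpa using Nat.le_of_eq hcorner.1.symm
      conv_lhs => rw [← h1]
      rw [take_snoc _ i hix, h2]
    conv_rhs => rw [hsplit]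
    rw [join_snoc]
    simp [flatC]
  · have H : ∀ i, i < (lines.map String.toList).length →
        (∀ j, j < i → ((flatC []).length : Int) + preLen (lines.map String.toList) j + (((lines.map String.toList)[j]!.length : Int)) + 2 + (end_.toList.length : Int) ≤ maximum) →
        ((flatC []).length : Int) + preLen (lines.map String.toList) i + (((lines.map String.toList)[i]!.length : Int)) + 1 + (end_.toList.length : Int) ≠ maximum := by
      intro i hi _ hEq
      rw [List.length_map] at hi
      refine hdiv ⟨i, hi, ?_⟩
      rw [get_map_toList lines i hi, preLen_map_toList] at hEq
      simp only [flatC, List.flatMap_nil, List.length_nil, Nat.cast_zero, zero_add] at hEq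
      have hstep : ((lines.take (i + 1)).map (fun s => (s.toList.length : Int) + 1)).sum
          = ((lines.take i).map (fun s => (s.toList.length : Int) + 1)).sum
            + ((lines[i]!.toList.length : Int) + 1) := by
        rw [take_snoc lines i hi, List.map_append, List.sum_append]
        simp [List.getElem!_eq_getElem?_getD, List.getElem?_eq_getElem hi]
      rw [hstep]
      omega
    have h := loop_eq maximum end_.toList (lines.map String.toList) [] H
    simp only [flatC, List.flatMap_nil, List.length_nil, Nat.cast_zero, List.nil_append] at h
    rw [h]
    cases hB : breakB_loop maximum (end_.toList.length : Int) (lines.map String.toList) 0 0 <;>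
      simp

theorem break_at_newline_changed : Claim_changed_break_at_newline := by
  unfold Claim_changed_break_at_newline; decide

theorem break_at_newline_tight : Claim_exact_break_at_newline := by
  intro lines maximum end_ _ hD
  obtain ⟨i, hi, hEqS, himp⟩ := hD
  unfold break_at_newline break_at_newline_alt
  have hix : i < (lines.map String.toList).length := by simpa using hi
  have hEqP : preLen (lines.map String.toList) (i + 1) + (end_.toList.length : Int) = maximum := by
    rw [preLen_map_toList]; exact hEqS
  have hA := loopA_boundary maximum end_.toList (lines.map String.toList) [] i hix
    (by simp only [flatC, List.flatMap_nil, List.length_nil, Nat.cast_zero, zero_add]; exact hEqP)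
  rw [show flatC ([] : List (List Char)) = [] from rfl, List.nil_append] at hA
  have hB := loopB_boundary maximum (end_.toList.length : Int) (lines.map String.toList) 0 0 i hix
    (by omega)
  have hgi : (lines.map String.toList)[i] = lines[i]!.toList := by
    simp [List.getElem!_eq_getElem?_getD, List.getElem?_eq_getElem hi]
  have hsnoc : (lines.map String.toList).take (i + 1)
      = (lines.map String.toList).take i ++ [lines[i]!.toList] := by
    rw [take_snoc _ i hix, hgi]
  by_cases hlast : i + 1 = lines.length
  · -- boundary prefix is all of lines: B falls through to the join, one line longer.
    rw [if_pos (by simpa using hlast)] at hB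
    rw [hA, hB]
    have hjoin : PySem.Chars.join ['\n'] (lines.map String.toList)
        = flatC ((lines.map String.toList).take i) ++ lines[i]!.toList := by
      have h1 : (lines.map String.toList).take (i + 1) = lines.map String.toList := by
        apply List.take_of_length_le; simpa using Nat.le_of_eq hlast.symm
      have hsplit2 : lines.map String.toList
          = (lines.map String.toList).take i ++ [lines[i]!.toList] := by
        conv_lhs => rw [← h1]
        rw [hsnoc]
      conv_lhs => rw [hsplit2]
      rw [join_snoc]
    rw [hjoin]
    intro hcontra
    have hl := congrArg List.length (String.ofList_inj.mp hcontra)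
    simp [flatC] at hl
    exact himp hlast (by simpa [List.getElem!_eq_getElem?_getD] using hl)
  · -- boundary prefix is proper: B keeps line i, A drops it.
    rw [if_neg (by simpa using hlast)] at hB
    rw [hA, hB]
    intro hcontra
    have hl := congrArg List.length (String.ofList_inj.mp hcontra)
    rw [show 0 + i + 1 = i + 1 from by omega, hsnoc] at hl
    simp [flatC] at hl
    omega
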